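-- pv_equiv track=rewrite | github.com/darkstar/CodingChallenges | 2021/18/part1.py | parse
-- ===== SOURCE A (Python) =====
-- def parse(s):
--   level = 0
--   res = []
--   i = 0
--   while i < len(s):
--     if s[i] == "[":
--       i += 1
--       level += 1
--     elif s[i] == "]":
--       i += 1
--       level -= 1
--     elif s[i] == ",":
--       i += 1
--     else:
--       num = ""
--       while s[i] in "0123456789":
--         num += s[i]
--         i += 1
--         if i >= len(s):
--           break
--       res.append((int(num), level))
--   return res
-- ===== SOURCE B (Python) =====
-- def parse(s):
--     n = len(s)
--     digs = "0123456789"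
--     starts = [i for i in range(n)
--               if s[i] in digs and (i == 0 or s[i - 1] not in digs)]
--     ends = [i for i in range(n)
--             if s[i] in digs and (i == n - 1 or s[i + 1] not in digs)]
--     return [(int(s[a:b + 1]), s[:a].count("[") - s[:a].count("]"))
--             for a, b in zip(starts, ends)]
-- ===== Notes on version B (the rewrite author's own statement) =====
-- stated objective: alternative
-- what changed: Replaces A's stateful while-loop scanner (running index, running bracket level, inner digit loop) by three staged declarative passes: two comprehensions find the start and end indices of every maximal digit run, and a final comprehension emits (int(s[a:b+1]), depth) where the depth is a closed-form prefix bracket count s[:a].count('[') - s[:a].count(']') instead of a running level variable.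
import Mathlib
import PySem

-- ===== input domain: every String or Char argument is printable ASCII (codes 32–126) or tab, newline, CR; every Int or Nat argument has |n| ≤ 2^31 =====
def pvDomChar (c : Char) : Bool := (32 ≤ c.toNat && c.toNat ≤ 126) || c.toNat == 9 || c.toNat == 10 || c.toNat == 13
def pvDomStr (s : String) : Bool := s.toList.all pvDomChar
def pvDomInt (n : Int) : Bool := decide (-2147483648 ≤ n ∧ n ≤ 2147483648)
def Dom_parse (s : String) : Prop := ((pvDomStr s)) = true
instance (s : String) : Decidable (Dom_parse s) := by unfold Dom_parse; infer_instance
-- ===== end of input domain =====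

-- B replaces A's stateful index/level scanner by three staged declarative passes: two
-- comprehensions locate the start and end index of every maximal digit run, and a final
-- comprehension emits (int(s[a:b+1]), prefix-bracket-count) — no running level, no inner loop.
-- Objective: alternative decomposition, equality claimed on Pre_parse (strings over
-- "[],0123456789", exactly where A returns; elsewhere A raises ValueError from int("")).

-- ===== PORT A =====
-- Python `s[i] in "0123456789"`: a single character, so the substring test is char membership
-- (exact on this use).
def parseIsDig (c : Char) : Bool := "0123456789".toList.contains c

-- the inner `num = ""; while s[i] in "0123456789": num += s[i]; i += 1 …` loop:
-- returns (digit run `num`, remaining characters)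
def parseReadNum : List Char → List Char × List Char
  | [] => ([], [])
  | c :: rest =>
    if parseIsDig c then
      let p := parseReadNum rest
      (c :: p.1, p.2)
    else ([], c :: rest)

-- the outer `while i < len(s)` loop; fuel = number of characters left, enough on every input on
-- which the Python loop terminates (inside Pre_parse each iteration consumes ≥ 1 character; the
-- fuel-exhausted and int("")-branches are reachable only outside Pre_parse, where Python raises
-- ValueError — `int(num)` is ported as PySem.Int.ofChars? with a default that Pre_parse excludes).
def parseGo : Nat → List Char → Int → List (Int × Int)
  | 0, _, _ => []
  | _ + 1, [], _ => []
  | fuel + 1, c :: rest, level =>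
    if c = '[' then parseGo fuel rest (level + 1)
    else if c = ']' then parseGo fuel rest (level - 1)
    else if c = ',' then parseGo fuel rest level
    else
      ((PySem.Int.ofChars? (parseReadNum (c :: rest)).1).getD 0, level)
        :: parseGo fuel (parseReadNum (c :: rest)).2 level

def parse (s : String) : List (Int × Int) := parseGo s.toList.length s.toList 0

-- ===== PORT B =====
-- `starts = [i for i in range(n) if s[i] in digs and (i == 0 or s[i-1] not in digs)]`;
-- all indexing is in range by construction, so `s[i]` is ported as `getD` with an (unreachable,
-- non-digit) default character — exact on every reachable index.
def startsOf (l : List Char) : List Nat :=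
  (List.range l.length).filter (fun i =>
    parseIsDig (l.getD i ' ') && (i == 0 || !parseIsDig (l.getD (i - 1) ' ')))

-- `ends = [i for i in range(n) if s[i] in digs and (i == n-1 or s[i+1] not in digs)]`
def endsOf (l : List Char) : List Nat :=
  (List.range l.length).filter (fun i =>
    parseIsDig (l.getD i ' ') && (i == l.length - 1 || !parseIsDig (l.getD (i + 1) ' ')))

-- `[(int(s[a:b+1]), s[:a].count("[") - s[:a].count("]")) for a, b in zip(starts, ends)]`
-- (slice bounds are in range, so s[a:b+1] = drop a |> take (b+1-a); int() of the digit run is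
-- PySem.Int.ofChars?, total here since the run is a nonempty digit string)
def altOf (l : List Char) : List (Int × Int) :=
  (List.zip (startsOf l) (endsOf l)).map (fun ab =>
    ((PySem.Int.ofChars? ((l.drop ab.1).take (ab.2 + 1 - ab.1))).getD 0,
     ((l.take ab.1).count '[' : Int) - ((l.take ab.1).count ']' : Int)))

def parse_alt (s : String) : List (Int × Int) := altOf s.toList

-- ===== PRECONDITION & SPEC =====
-- Pre_parse excludes exactly the strings containing a character outside "[],0123456789":
-- on every such string A raises ValueError (int("") on the first stray character), so A returns
-- normally iff Pre_parse holds.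
def Pre_parse (s : String) : Prop :=
  s.toList.all (fun c => ['[', ']', ',', '0', '1', '2', '3', '4', '5', '6', '7', '8', '9'].contains c) = true
instance (s : String) : Decidable (Pre_parse s) := by unfold Pre_parse; infer_instance

def pvWitness_parse : String := "[[1,22],3]"

def Spec_parse (s : String) (out : List (Int × Int)) : Prop := out = parse_alt s
instance (s : String) (out : List (Int × Int)) : Decidable (Spec_parse s out) := by unfold Spec_parse; infer_instance

-- ===== CLAIM (what is proved, stated in full; the proofs are below) =====
def Claim_equal_parse : Prop := ∀ (s : String), Dom_parse s → Pre_parse s → Spec_parse s (parse s)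

-- ===== LEMMAS AND PROOFS =====

theorem parseReadNum_eq (l : List Char) :
    parseReadNum l = (l.takeWhile parseIsDig, l.dropWhile parseIsDig) := by
  induction l with
  | nil => simp [parseReadNum]
  | cons c rest ih =>
    by_cases h : parseIsDig c <;> simp [parseReadNum, h, ih]

theorem parseGo_nil (n : Nat) (level : Int) : parseGo n [] level = [] := by
  cases n <;> simp [parseGo]

theorem dropWhile_head_false {p : Char → Bool} :
    ∀ (l : List Char) (d : Char) (tl : List Char), l.dropWhile p = d :: tl → p d = false := by
  intro l
  induction l with
  | nil => intro d tl h; simp at h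
  | cons c rest ih =>
    intro d tl h
    by_cases hc : p c
    · rw [List.dropWhile_cons_of_pos hc] at h; exact ih d tl h
    · rw [List.dropWhile_cons_of_neg hc] at h
      cases h; simpa using hc

theorem startsOf_cons (c : Char) (rest : List Char) (hc : parseIsDig c = false) :
    startsOf (c :: rest) = (startsOf rest).map Nat.succ := by
  unfold startsOf
  simp only [List.length_cons, List.range_succ_eq_map, List.filter_cons, List.filter_map]
  have hcong : ∀ i ∈ List.range rest.length,
      ((fun i => parseIsDig ((c :: rest).getD i ' ') && (i == 0 || !parseIsDig ((c :: rest).getD (i - 1) ' '))) ∘ Nat.succ) i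
      = (fun i => parseIsDig (rest.getD i ' ') && (i == 0 || !parseIsDig (rest.getD (i - 1) ' '))) i := by
    intro i _
    cases i with
    | zero => simp [hc]
    | succ k => simp
  rw [List.filter_congr hcong]
  simp [hc]

theorem endsOf_cons (c : Char) (rest : List Char) (hc : parseIsDig c = false) :
    endsOf (c :: rest) = (endsOf rest).map Nat.succ := by
  unfold endsOf
  simp only [List.length_cons, List.range_succ_eq_map, List.filter_cons, List.filter_map]
  have hcong : ∀ i ∈ List.range rest.length,
      ((fun i => parseIsDig ((c :: rest).getD i ' ') && (i == rest.length + 1 - 1 || !parseIsDig ((c :: rest).getD (i + 1) ' '))) ∘ Nat.succ) i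
      = (fun i => parseIsDig (rest.getD i ' ') && (i == rest.length - 1 || !parseIsDig (rest.getD (i + 1) ' '))) i := by
    intro i hi
    simp only [List.mem_range] at hi
    have h1 : ((i + 1 : Nat) == rest.length + 1 - 1) = ((i : Nat) == rest.length - 1) := by
      rw [Bool.eq_iff_iff]
      simp only [beq_iff_eq]
      omega
    simp only [Function.comp_apply, Nat.succ_eq_add_one, List.getD_cons_succ, h1]
  rw [List.filter_congr hcong]
  simp [hc]

theorem filter_beq_range (m k : Nat) (hk : k < m) :
    (List.range m).filter (fun i => i == k) = [k] := by
  have : m = k + 1 + (m - k - 1) := by omega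
  rw [this, List.range_add, List.filter_append, List.range_succ, List.filter_append]
  have h1 : (List.range k).filter (fun i => i == k) = [] := by
    rw [List.filter_eq_nil_iff]
    intro a ha
    simp only [List.mem_range] at ha
    simp only [beq_iff_eq]
    omega
  have h2 : (List.map (fun x => k + 1 + x) (List.range (m - k - 1))).filter (fun i => i == k) = [] := by
    rw [List.filter_eq_nil_iff]
    intro a ha
    simp only [List.mem_map] at ha
    obtain ⟨x, _, rfl⟩ := ha
    simp only [beq_iff_eq]
    omega
  rw [h1, h2]
  simp

theorem startsOf_run (ds dw : List Char) (hne : ds ≠ []) (hds : ∀ d ∈ ds, parseIsDig d = true)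
    (hdw : parseIsDig (dw.getD 0 ' ') = false) :
    startsOf (ds ++ dw) = 0 :: (startsOf dw).map (fun j => ds.length + j) := by
  have hm : 0 < ds.length := List.length_pos_iff.mpr hne
  unfold startsOf
  rw [List.length_append, List.range_add, List.filter_append, List.filter_map]
  have hpart1 : (List.range ds.length).filter (fun i =>
      parseIsDig ((ds ++ dw).getD i ' ') && (i == 0 || !parseIsDig ((ds ++ dw).getD (i - 1) ' '))) = [0] := by
    rw [List.filter_congr (q := fun i => i == 0)]
    · exact filter_beq_range _ _ hm
    · intro i hi
      simp only [List.mem_range] at hi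
      have hgi : (ds ++ dw).getD i ' ' = ds.getD i ' ' := List.getD_append _ _ _ _ hi
      have hdi : parseIsDig (ds.getD i ' ') = true := by
        rw [List.getD_eq_getElem ds ' ' hi]
        exact hds _ (List.getElem_mem hi)
      cases i with
      | zero =>
        simp only [hgi, hdi]
        simp
      | succ k =>
        have hgk : (ds ++ dw).getD k ' ' = ds.getD k ' ' := List.getD_append _ _ _ _ (by omega)
        have hdk : parseIsDig (ds.getD k ' ') = true := by
          rw [List.getD_eq_getElem ds ' ' (by omega)]
          exact hds _ (List.getElem_mem (by omega))
        simp only [Nat.add_one_sub_one, hgi, hdi, hgk, hdk]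
        simp
  have hpart2 : ∀ j ∈ List.range dw.length,
      ((fun i => parseIsDig ((ds ++ dw).getD i ' ') && (i == 0 || !parseIsDig ((ds ++ dw).getD (i - 1) ' '))) ∘ (fun x => ds.length + x)) j
      = (fun i => parseIsDig (dw.getD i ' ') && (i == 0 || !parseIsDig (dw.getD (i - 1) ' '))) j := by
    intro j hj
    simp only [List.mem_range] at hj
    have hg : (ds ++ dw).getD (ds.length + j) ' ' = dw.getD j ' ' := by
      rw [List.getD_append_right _ _ _ _ (by omega)]
      congr 1
      omega
    cases j with
    | zero =>
      have hg0 : (ds ++ dw).getD ds.length ' ' = dw.getD 0 ' ' := by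
        rw [List.getD_append_right _ _ _ _ (by omega)]
        congr 1
        omega
      simp only [Function.comp_apply, Nat.add_zero, hg0, hdw]
      simp
    | succ k =>
      have hgk : (ds ++ dw).getD (ds.length + k) ' ' = dw.getD k ' ' := by
        rw [List.getD_append_right _ _ _ _ (by omega)]
        congr 1
        omega
      have h0 : ((ds.length + (k + 1) : Nat) == 0) = ((k + 1 : Nat) == 0) := by
        rw [Bool.eq_iff_iff]; simp only [beq_iff_eq]; omega
      have hsub : ds.length + (k + 1) - 1 = ds.length + k := by omega
      simp only [Function.comp_apply, hg, h0, hsub, hgk, Nat.add_one_sub_one]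
  rw [hpart1, List.filter_congr hpart2]
  simp

theorem endsOf_run (ds dw : List Char) (hne : ds ≠ []) (hds : ∀ d ∈ ds, parseIsDig d = true)
    (hdw : parseIsDig (dw.getD 0 ' ') = false) :
    endsOf (ds ++ dw) = (ds.length - 1) :: (endsOf dw).map (fun j => ds.length + j) := by
  have hm : 0 < ds.length := List.length_pos_iff.mpr hne
  unfold endsOf
  rw [List.length_append, List.range_add, List.filter_append, List.filter_map]
  have hpart1 : (List.range ds.length).filter (fun i =>
      parseIsDig ((ds ++ dw).getD i ' ') && (i == ds.length + dw.length - 1 || !parseIsDig ((ds ++ dw).getD (i + 1) ' '))) = [ds.length - 1] := by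
    rw [List.filter_congr (q := fun i => i == ds.length - 1)]
    · exact filter_beq_range _ _ (by omega)
    · intro i hi
      simp only [List.mem_range] at hi
      have hgi : (ds ++ dw).getD i ' ' = ds.getD i ' ' := List.getD_append _ _ _ _ hi
      have hdi : parseIsDig (ds.getD i ' ') = true := by
        rw [List.getD_eq_getElem ds ' ' hi]
        exact hds _ (List.getElem_mem hi)
      by_cases hlast : i = ds.length - 1
      · subst hlast
        have hg1 : (ds ++ dw).getD (ds.length - 1 + 1) ' ' = dw.getD 0 ' ' := by
          rw [List.getD_append_right _ _ _ _ (by omega)]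
          congr 1
          omega
        by_cases hdwnil : dw = []
        · subst hdwnil
          have hlen : (ds ++ ([] : List Char)).length - 1 = ds.length - 1 := by simp
          simp only [hgi, hdi]
          simp
        · have hlen : ((ds.length - 1 : Nat) == ds.length + dw.length - 1) = false := by
            have : 0 < dw.length := List.length_pos_iff.mpr hdwnil
            simp only [beq_eq_false_iff_ne, ne_eq]
            omega
          simp only [hgi, hdi, hg1, hdw, hlen]
          simp
      · have hg1 : (ds ++ dw).getD (i + 1) ' ' = ds.getD (i + 1) ' ' :=
          List.getD_append _ _ _ _ (by omega)
        have hd1 : parseIsDig (ds.getD (i + 1) ' ') = true := by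
          rw [List.getD_eq_getElem ds ' ' (by omega)]
          exact hds _ (List.getElem_mem (by omega))
        have hlen : ((i : Nat) == ds.length + dw.length - 1) = false := by
          simp only [beq_eq_false_iff_ne, ne_eq]
          omega
        have hlast' : ((i : Nat) == ds.length - 1) = false := by
          simp only [beq_eq_false_iff_ne, ne_eq]
          omega
        simp only [hgi, hdi, hg1, hd1, hlen, hlast']
        simp
  have hpart2 : ∀ j ∈ List.range dw.length,
      ((fun i => parseIsDig ((ds ++ dw).getD i ' ') && (i == ds.length + dw.length - 1 || !parseIsDig ((ds ++ dw).getD (i + 1) ' '))) ∘ (fun x => ds.length + x)) j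
      = (fun i => parseIsDig (dw.getD i ' ') && (i == dw.length - 1 || !parseIsDig (dw.getD (i + 1) ' '))) j := by
    intro j hj
    simp only [List.mem_range] at hj
    have hg : (ds ++ dw).getD (ds.length + j) ' ' = dw.getD j ' ' := by
      rw [List.getD_append_right _ _ _ _ (by omega)]
      congr 1
      omega
    have hg1 : (ds ++ dw).getD (ds.length + j + 1) ' ' = dw.getD (j + 1) ' ' := by
      rw [List.getD_append_right _ _ _ _ (by omega)]
      congr 1
      omega
    have hlen : ((ds.length + j : Nat) == ds.length + dw.length - 1) = ((j : Nat) == dw.length - 1) := by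
      rw [Bool.eq_iff_iff]
      simp only [beq_iff_eq]
      omega
    simp only [Function.comp_apply, hg, hg1, hlen]
  rw [hpart1, List.filter_congr hpart2]
  simp

theorem altOf_cons (c : Char) (rest : List Char) (hc : parseIsDig c = false) :
    altOf (c :: rest) =
      (altOf rest).map (fun p =>
        (p.1, p.2 + ((if c = '[' then 1 else 0) - (if c = ']' then 1 else 0) : Int))) := by
  unfold altOf
  rw [startsOf_cons c rest hc, endsOf_cons c rest hc, List.zip_map, List.map_map, List.map_map]
  apply List.map_congr_left
  intro ab _
  obtain ⟨a, b⟩ := ab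
  simp only [Function.comp_apply, Prod.map_apply, Nat.succ_eq_add_one]
  have hdrop : List.take (b + 1 + 1 - (a + 1)) (List.drop (a + 1) (c :: rest))
      = List.take (b + 1 - a) (List.drop a rest) := by
    rw [List.drop_succ_cons]
    congr 1
    omega
  have htake : List.take (a + 1) (c :: rest) = c :: List.take a rest := List.take_succ_cons
  rw [hdrop, htake, List.count_cons, List.count_cons]
  refine Prod.ext rfl ?_
  simp only []
  push_cast
  by_cases h1 : c = '[' <;> by_cases h2 : c = ']' <;>
    simp [h1, h2, beq_iff_eq] <;> ring

theorem altOf_run (ds dw : List Char) (hne : ds ≠ []) (hds : ∀ d ∈ ds, parseIsDig d = true)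
    (hdw : parseIsDig (dw.getD 0 ' ') = false) :
    altOf (ds ++ dw) = ((PySem.Int.ofChars? ds).getD 0, 0) :: altOf dw := by
  have hm : 0 < ds.length := List.length_pos_iff.mpr hne
  have hcount : ∀ ch : Char, parseIsDig ch = false → List.count ch ds = 0 := by
    intro ch hch
    rw [List.count_eq_zero]
    intro hmem
    rw [hds ch hmem] at hch
    exact absurd hch (by simp)
  unfold altOf
  rw [startsOf_run ds dw hne hds hdw, endsOf_run ds dw hne hds hdw]
  rw [List.zip_cons_cons, List.zip_map, List.map_cons, List.map_map]
  congr 1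
  · -- head
    simp only []
    have h1 : List.take (ds.length - 1 + 1 - 0) (List.drop 0 (ds ++ dw)) = ds := by
      rw [List.drop_zero]
      have : ds.length - 1 + 1 - 0 = ds.length := by omega
      rw [this, List.take_append, List.take_length]
      simp
    rw [h1]
    simp
  · apply List.map_congr_left
    intro ab _
    obtain ⟨a, b⟩ := ab
    simp only [Function.comp_apply, Prod.map_apply]
    have hdrop : List.take (ds.length + b + 1 - (ds.length + a)) (List.drop (ds.length + a) (ds ++ dw))
        = List.take (b + 1 - a) (List.drop a dw) := by
      rw [List.drop_append]
      have h2 : List.drop (ds.length + a) ds = [] := by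
        rw [List.drop_eq_nil_iff]
        omega
      have h3 : ds.length + a - ds.length = a := by omega
      rw [h2, h3, List.nil_append]
      congr 1
      omega
    have htake : List.take (ds.length + a) (ds ++ dw) = ds ++ List.take a dw := by
      rw [List.take_append]
      have h2 : List.take (ds.length + a) ds = ds := List.take_of_length_le (by omega)
      have h3 : ds.length + a - ds.length = a := by omega
      rw [h2, h3]
    rw [hdrop, htake]
    refine Prod.ext rfl ?_
    simp only [List.count_append]
    rw [hcount '[' (by decide), hcount ']' (by decide)]
    simp

theorem parseMain : ∀ (n : Nat) (l : List Char) (level : Int),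
    l.length ≤ n →
    (∀ c ∈ l, c ∈ ['[', ']', ',', '0', '1', '2', '3', '4', '5', '6', '7', '8', '9']) →
    parseGo n l level = (altOf l).map (fun p => (p.1, p.2 + level)) := by
  intro n
  induction n with
  | zero =>
    intro l level hlen _
    have : l = [] := List.length_eq_zero_iff.mp (Nat.le_zero.mp hlen)
    subst this
    simp [parseGo_nil, altOf, startsOf, endsOf]
  | succ n ih =>
    intro l level hlen hall
    cases l with
    | nil => simp [parseGo_nil, altOf, startsOf, endsOf]
    | cons c rest =>
      have hmem := hall c (by simp)
      have hrest : ∀ d ∈ rest, d ∈ ['[', ']', ',', '0','1','2','3','4','5','6','7','8','9'] :=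
        fun d hd => hall d (by simp [hd])
      have hlen' : rest.length ≤ n := by simpa using hlen
      by_cases h1 : c = '['
      · subst h1
        have hgo : parseGo (n + 1) ('[' :: rest) level = parseGo n rest (level + 1) := by
          simp [parseGo]
        rw [hgo, ih rest (level + 1) hlen' hrest, altOf_cons _ _ (by decide), List.map_map]
        apply List.map_congr_left
        intro p _
        simp only [Function.comp_apply]
        refine Prod.ext rfl ?_
        rw [show (if ('[' : Char) = ']' then (1:Int) else 0) = 0 from by decide]
        simp only [if_true]
        ring
      · by_cases h2 : c = ']'
        · subst h2
          have hgo : parseGo (n + 1) (']' :: rest) level = parseGo n rest (level - 1) := by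
            simp [parseGo]
          rw [hgo, ih rest (level - 1) hlen' hrest, altOf_cons _ _ (by decide), List.map_map]
          apply List.map_congr_left
          intro p _
          simp only [Function.comp_apply]
          refine Prod.ext rfl ?_
          rw [show (if (']' : Char) = '[' then (1:Int) else 0) = 0 from by decide]
          simp only [if_true]
          ring
        · by_cases h3 : c = ','
          · subst h3
            have hgo : parseGo (n + 1) (',' :: rest) level = parseGo n rest level := by
              simp [parseGo]
            rw [hgo, ih rest level hlen' hrest, altOf_cons _ _ (by decide), List.map_map]
            apply List.map_congr_left
            intro p _
            simp only [Function.comp_apply]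
            refine Prod.ext rfl ?_
            rw [show (if (',' : Char) = '[' then (1:Int) else 0) = 0 from by decide,
              show (if (',' : Char) = ']' then (1:Int) else 0) = 0 from by decide]
            ring
          · -- c is a digit
            have hc : parseIsDig c = true := by
              simp only [List.mem_cons, List.not_mem_nil, or_false] at hmem
              rcases hmem with rfl | rfl | rfl | rfl | rfl | rfl | rfl | rfl | rfl | rfl | rfl | rfl | rfl
              · exact absurd rfl h1
              · exact absurd rfl h2
              · exact absurd rfl h3
              all_goals rfl
            set ds := (c :: rest).takeWhile parseIsDig with hds
            set dw := (c :: rest).dropWhile parseIsDig with hdw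
            have hsplit : ds ++ dw = c :: rest := List.takeWhile_append_dropWhile
            have hdsall : ∀ d ∈ ds, parseIsDig d = true := fun d hd => List.mem_takeWhile_imp hd
            have hdsc : ds = c :: rest.takeWhile parseIsDig := by
              rw [hds, List.takeWhile_cons_of_pos hc]
            have hdsne : ds ≠ [] := by rw [hdsc]; simp
            have hdwhead : parseIsDig (dw.getD 0 ' ') = false := by
              cases hdweq : dw with
              | nil => rfl
              | cons d tl =>
                have := dropWhile_head_false (c :: rest) d tl (by rw [← hdw, hdweq])
                simpa using this
            have hgo : parseGo (n + 1) (c :: rest) level =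
                ((PySem.Int.ofChars? ds).getD 0, level) :: parseGo n dw level := by
              simp only [parseGo, if_neg h1, if_neg h2, if_neg h3, parseReadNum_eq]
              rw [hds, hdw]
            have hlen2 : dw.length ≤ n := by
              have h := congrArg List.length hsplit
              rw [hdsc] at h
              simp only [List.length_append, List.length_cons] at h
              omega
            have hall2 : ∀ d ∈ dw, d ∈ ['[', ']', ',', '0','1','2','3','4','5','6','7','8','9'] := by
              intro d hd
              apply hall
              rw [← hsplit]
              exact List.mem_append_right _ hd
            rw [hgo, ih dw level hlen2 hall2]
            conv_rhs => rw [← hsplit]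
            rw [altOf_run ds dw hdsne hdsall hdwhead, List.map_cons]
            simp

-- ===== VERDICT (by name: the statement is the Claim_ definition above) =====
theorem parse_spec : Claim_equal_parse := by
  intro s _ hpre
  unfold Spec_parse parse parse_alt
  have hall : ∀ c ∈ s.toList, c ∈ ['[', ']', ',', '0', '1', '2', '3', '4', '5', '6', '7', '8', '9'] := by
    intro c hc
    simpa using List.all_eq_true.mp hpre c hc
  rw [parseMain s.toList.length s.toList 0 le_rfl hall]
  simp
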